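-- pv_equiv track=rewrite | github.com/guainlin/convenient-code | many_to_one.py | many_to_one
-- ===== SOURCE A (Python) =====
-- def many_to_one ( li_repeat , int_correct_position ):
--     error = 0
--     for i in li_repeat:
--         int_correct_position = int_correct_position -i
--         error += 1
--         if int_correct_position <= 0 :
--             break
--     return ( error )
-- ===== SOURCE B (Python) =====
-- def many_to_one(li_repeat, int_correct_position):
--     sums = []
--     total = 0
--     for x in li_repeat:
--         total += x
--         sums.append(total)
--     return next((i for i, s in enumerate(sums, 1) if s >= int_correct_position),
--                 len(li_repeat))
-- ===== Notes on version B (the rewrite author's own statement) =====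
-- stated objective: idiomatic
-- what changed: Replaces the fused subtract-count-break loop by a 'build prefix sums, then find the first 1-based index whose sum reaches the target' decomposition (next(...) with len as default), using position<=0 <=> prefix_sum>=target.
import Mathlib
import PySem

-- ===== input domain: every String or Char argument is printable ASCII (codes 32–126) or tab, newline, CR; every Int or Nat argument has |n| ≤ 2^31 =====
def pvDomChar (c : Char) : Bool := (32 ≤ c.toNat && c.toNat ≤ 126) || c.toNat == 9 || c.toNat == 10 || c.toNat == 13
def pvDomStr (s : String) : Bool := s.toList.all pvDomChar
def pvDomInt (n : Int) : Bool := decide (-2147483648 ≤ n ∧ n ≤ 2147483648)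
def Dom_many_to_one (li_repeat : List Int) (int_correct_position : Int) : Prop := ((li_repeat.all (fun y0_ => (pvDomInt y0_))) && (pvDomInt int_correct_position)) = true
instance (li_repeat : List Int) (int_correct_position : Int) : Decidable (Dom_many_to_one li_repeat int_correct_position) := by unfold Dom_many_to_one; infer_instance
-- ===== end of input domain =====

-- B replaces A's fused subtract-count-break loop by "build prefix sums, then find the
-- first 1-based index whose sum reaches the target" (idiomatic decomposition, same cost).


-- ===== PORT A =====
-- A's loop: subtract each element, count, break when position ≤ 0.
def manyLoopA : List Int → Int → Int → Int
  | [], _, error => error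
  | i :: rest, pos, error =>
      let pos' := pos - i
      let error' := error + 1
      if pos' ≤ 0 then error' else manyLoopA rest pos' error'

def many_to_one (li_repeat : List Int) (int_correct_position : Int) : Int :=
  manyLoopA li_repeat int_correct_position 0

-- ===== PORT B =====
-- B: prefix sums (scanl from 0, head dropped), then first 1-based index with sum ≥ target,
-- defaulting to the list length.
def many_to_one_alt (li_repeat : List Int) (int_correct_position : Int) : Int :=
  let sums := (li_repeat.scanl (· + ·) 0).tail
  match sums.findIdx? (fun s => int_correct_position ≤ s) with
  | some i => (i : Int) + 1
  | none => (li_repeat.length : Int)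

-- ===== PRECONDITION & SPEC =====
def Spec_many_to_one (li_repeat : List Int) (int_correct_position : Int) (out : Int) : Prop := out = many_to_one_alt li_repeat int_correct_position
instance (li_repeat : List Int) (int_correct_position : Int) (out : Int) : Decidable (Spec_many_to_one li_repeat int_correct_position out) := by unfold Spec_many_to_one; infer_instance

-- ===== CLAIM (what is proved, stated in full; the proofs are below) =====
def Claim_equal_many_to_one : Prop := ∀ (li_repeat : List Int) (int_correct_position : Int), Dom_many_to_one li_repeat int_correct_position → Spec_many_to_one li_repeat int_correct_position (many_to_one li_repeat int_correct_position)

-- ===== LEMMAS AND PROOFS =====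

-- Loop invariant: A's loop from position p₀ - c equals B's search over prefix sums started at c.
theorem scanl_add_cons_tail (b : Int) (l : List Int) :
    List.scanl (· + ·) b l = b :: (List.scanl (· + ·) b l).tail := by
  cases l <;> simp

theorem manyLoopA_eq_find (li : List Int) (p₀ : Int) :
    ∀ (c err : Int),
      manyLoopA li (p₀ - c) err =
        match (li.scanl (· + ·) c).tail.findIdx? (fun s => p₀ ≤ s) with
        | some i => err + (i : Int) + 1
        | none => err + (li.length : Int) := by
  induction li with
  | nil => intro c err; simp [manyLoopA]
  | cons a rest ih =>
    intro c err
    rw [List.scanl_cons, List.tail_cons, scanl_add_cons_tail, List.findIdx?_cons]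
    by_cases h : p₀ ≤ c + a
    · have h' : p₀ - c - a ≤ 0 := by omega
      simp [manyLoopA, h', h]
    · have h' : ¬ (p₀ - c - a ≤ 0) := by omega
      have e : p₀ - c - a = p₀ - (c + a) := by ring
      simp only [manyLoopA, h, decide_false, Bool.false_eq_true, e]
      rw [ih (c + a) (err + 1)]
      cases hf : (rest.scanl (· + ·) (c + a)).tail.findIdx? (fun s => p₀ ≤ s) with
      | none =>
        have h2 : ¬ (p₀ - (c + a) ≤ 0) := by omega
        simp [h2]; ring
      | some i =>
        have h2 : ¬ (p₀ - (c + a) ≤ 0) := by omega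
        simp [h2]; push_cast; ring

-- ===== VERDICT (by name: the statement is the Claim_ definition above) =====
theorem many_to_one_spec : Claim_equal_many_to_one := by
  intro li p _
  unfold Spec_many_to_one many_to_one many_to_one_alt
  have h := manyLoopA_eq_find li p 0 0
  simp only [sub_zero] at h
  rw [h]
  cases hf : (li.scanl (· + ·) 0).tail.findIdx? (fun s => p ≤ s) with
  | none => simp only [hf]; ring
  | some i => simp only [hf]; ring
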